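-- pv_equiv track=rewrite | github.com/bormanjo/py-snake | game.py | get_speed
-- ===== SOURCE A (Python) =====
-- def get_speed(score):
--     score_speed_map = {
--         (0, 1000): 4,
--         (1000, 2000): 5,
--         (2000, 3000): 6,
--         (3000, 4000): 7,
--         (4000, 5000): 8,
--         (5000, 6000): 9,
--         (6000, 7000): 10,
--         (7000, 8000): 11,
--         (8000, 9000): 12,
--         (9000, 10000): 13,
--         (10000, 11000): 14,
--     }
--
--     for lb, ub in score_speed_map.keys():
--         if lb <= score < ub:
--             return score_speed_map[(lb, ub)]
--
--     return 15
-- ===== SOURCE B (Python) =====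
-- def get_speed(score):
--     if 0 <= score < 11000:
--         return 4 + int(score // 1000)
--     return 15
-- ===== Notes on version B (the rewrite author's own statement) =====
-- stated objective: simpler
-- what changed: Replaced the bucket-dictionary scan with a single range guard and a closed-form arithmetic expression (floor division by the bucket width).
import Mathlib
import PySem

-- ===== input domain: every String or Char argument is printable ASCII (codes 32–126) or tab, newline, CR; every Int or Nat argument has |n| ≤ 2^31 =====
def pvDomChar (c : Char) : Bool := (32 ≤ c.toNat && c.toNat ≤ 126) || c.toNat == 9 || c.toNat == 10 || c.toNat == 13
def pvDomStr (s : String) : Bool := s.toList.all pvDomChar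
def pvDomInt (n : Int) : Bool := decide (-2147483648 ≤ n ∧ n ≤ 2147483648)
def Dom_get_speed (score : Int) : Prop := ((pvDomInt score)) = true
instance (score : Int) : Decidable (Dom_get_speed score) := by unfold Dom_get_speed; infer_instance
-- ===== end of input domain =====

-- B replaces A's bucket-dictionary scan with a single range guard plus the closed form 4 + score // 1000 (objective: simpler).

-- ===== PORT A =====
-- the dict's keys in insertion order, with their values (Python iterates over keys and looks each matched key up)
def getSpeedMap : List ((Int × Int) × Int) :=
  [((0, 1000), 4), ((1000, 2000), 5), ((2000, 3000), 6), ((3000, 4000), 7),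
   ((4000, 5000), 8), ((5000, 6000), 9), ((6000, 7000), 10), ((7000, 8000), 11),
   ((8000, 9000), 12), ((9000, 10000), 13), ((10000, 11000), 14)]

-- the for-loop over the keys: first (lb, ub) with lb ≤ score < ub returns its value, else 15
def getSpeedLoop (score : Int) : List ((Int × Int) × Int) → Int
  | [] => 15
  | ((lb, ub), v) :: rest => if lb ≤ score ∧ score < ub then v else getSpeedLoop score rest

def get_speed (score : Int) : Int := getSpeedLoop score getSpeedMap

-- ===== PORT B =====
def get_speed_alt (score : Int) : Int :=
  if 0 ≤ score ∧ score < 11000 then 4 + PySem.Int.floordiv score 1000 else 15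

-- ===== PRECONDITION & SPEC =====
def Spec_get_speed (score : Int) (out : Int) : Prop := out = get_speed_alt score
instance (score : Int) (out : Int) : Decidable (Spec_get_speed score out) := by unfold Spec_get_speed; infer_instance

-- ===== CLAIM (what is proved, stated in full; the proofs are below) =====
def Claim_equal_get_speed : Prop := ∀ (score : Int), Dom_get_speed score → Spec_get_speed score (get_speed score)

-- ===== LEMMAS AND PROOFS =====

-- ===== VERDICT (by name: the statement is the Claim_ definition above) =====
set_option maxHeartbeats 4000000 in
theorem get_speed_spec : Claim_equal_get_speed := by
  intro score _
  unfold Spec_get_speed get_speed get_speed_alt getSpeedMap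
  rw [PySem.Int.floordiv_eq_ediv_of_pos (by norm_num)]
  simp only [getSpeedLoop]
  split_ifs <;> omega
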